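-- pv_equiv track=rewrite | github.com/SaTr0V/Conf-Management | Practice 2: Dependency graph/src/dependency_graph.py | _bfs_reverse_collect
-- ===== SOURCE A (Python) =====
-- from typing import List, Tuple, Dict, Set, Optional
-- from collections import deque
--
-- def _bfs_reverse_collect(start_id: str, rev_graph: Dict[str, List[str]], max_depth: Optional[int]) -> List[str]:
--     """Внутренний BFS по обратному графу — вернуть все узлы, которые достижимы от start_id (вверх)"""
--
--     q = deque([(start_id, 0)])
--     visited: Set[str] = set([start_id])
--     results: Set[str] = set()
--
--     while q:
--         node, depth = q.popleft()
--         if max_depth is not None and depth >= max_depth: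
--             continue
--         for parent in rev_graph.get(node, []):
--             if parent not in visited:
--                 visited.add(parent)
--                 results.add(parent)
--                 q.append((parent, depth + 1))
--     return sorted(results)
-- ===== SOURCE B (Python) =====
-- from typing import List, Dict, Optional
--
--
-- def _bfs_reverse_collect(start_id: str, rev_graph: Dict[str, List[str]], max_depth: Optional[int]) -> List[str]:
--     """Naive fixpoint saturation: repeatedly take the parents of the WHOLE set
--     reached so far (not of a frontier) until nothing new appears or the round
--     limit is hit.  No queue, no visited/frontier bookkeeping: correctness comes
--     from the fact that after k rounds `reach` is exactly the set of nodes at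
--     reverse-distance <= k from start_id, so stopping after max_depth rounds (or
--     at the fixpoint) yields all ancestors within the depth bound."""
--     reach = {start_id}
--     rounds = 0
--     while max_depth is None or rounds < max_depth:
--         new = {p for node in reach for p in rev_graph.get(node, [])} - reach
--         if not new:
--             break
--         reach |= new
--         rounds += 1
--     return sorted(reach - {start_id})
-- ===== Notes on version B (the rewrite author's own statement) =====
-- stated objective: alternative
-- what changed: Replaces the queue-based BFS (deque of (node, depth) pairs with visited/results sets) by naive fixpoint saturation: each round recomputes the parents of the entire reached set and unions in whatever is new, stopping at the fixpoint or after max_depth rounds; there is no queue, frontier or visited/results split.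
import Mathlib
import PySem

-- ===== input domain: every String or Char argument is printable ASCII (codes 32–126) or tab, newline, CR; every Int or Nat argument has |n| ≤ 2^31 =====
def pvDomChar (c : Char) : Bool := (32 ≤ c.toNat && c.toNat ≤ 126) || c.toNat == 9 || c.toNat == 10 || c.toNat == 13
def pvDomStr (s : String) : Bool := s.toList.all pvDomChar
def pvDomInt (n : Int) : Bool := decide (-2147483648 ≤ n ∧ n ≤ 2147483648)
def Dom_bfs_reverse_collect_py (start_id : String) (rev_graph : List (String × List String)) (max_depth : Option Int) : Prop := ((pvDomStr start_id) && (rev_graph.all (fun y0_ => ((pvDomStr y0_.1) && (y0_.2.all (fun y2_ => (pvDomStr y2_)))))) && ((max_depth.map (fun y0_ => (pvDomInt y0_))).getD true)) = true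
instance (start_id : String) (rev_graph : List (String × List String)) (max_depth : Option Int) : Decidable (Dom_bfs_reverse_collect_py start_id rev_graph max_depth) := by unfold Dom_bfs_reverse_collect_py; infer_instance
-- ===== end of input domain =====

-- B replaces A's queue BFS (deque of (node, depth) pairs, visited/results sets) by naive
-- fixpoint saturation: each round recomputes the parents of the WHOLE reached set and
-- unions in the new ones, stopping at the fixpoint or after max_depth rounds;
-- objective: alternative algorithm, no speed claim.
-- Both loops carry a fuel parameter as a pure totality guard; the fuel strictly exceeds
-- the loop measure (proved below), so it never changes the computed value.

-- all strings that can ever be discovered (every parent list concatenated)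
def pvUni (rev : List (String × List String)) : List String := rev.flatMap (fun p => p.2)

-- ===== PORT A =====
-- Python: `max_depth is not None and depth >= max_depth`
def pvCondA (maxd : Option Int) (depth : Int) : Bool :=
  match maxd with | none => false | some m => decide (depth ≥ m)

-- the body of A's inner `for parent in rev_graph.get(node, [])` loop
def pvFA (depth : Int) (s : List (String × Int) × PySem.Set String × PySem.Set String)
    (p : String) : List (String × Int) × PySem.Set String × PySem.Set String :=
  if PySem.Set.contains s.2.1 p then s
  else (s.1 ++ [(p, depth + 1)], PySem.Set.add s.2.1 p, PySem.Set.add s.2.2 p)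

def pvStepA (rev : List (String × List String)) (depth : Int)
    (st : List (String × Int) × PySem.Set String × PySem.Set String) (node : String) :
    List (String × Int) × PySem.Set String × PySem.Set String :=
  (PySem.Dict.getD ⟨rev⟩ node []).foldl (pvFA depth) st

-- A's `while q:` loop (fuel only guards totality; it never runs out, see pvLoopA_fuel)
def pvLoopA (rev : List (String × List String)) (maxd : Option Int) :
    Nat → List (String × Int) → PySem.Set String → PySem.Set String → PySem.Set String
  | _, [], _, res => res
  | 0, _ :: _, _, res => res
  | fuel + 1, (node, depth) :: q', vis, res =>
    if pvCondA maxd depth then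
      pvLoopA rev maxd fuel q' vis res
    else
      pvLoopA rev maxd fuel (pvStepA rev depth (q', vis, res) node).1
        (pvStepA rev depth (q', vis, res) node).2.1
        (pvStepA rev depth (q', vis, res) node).2.2

def bfs_reverse_collect_py (start_id : String) (rev_graph : List (String × List String))
    (max_depth : Option Int) : List String :=
  PySem.List.sorted
    (pvLoopA rev_graph max_depth (2 * (pvUni rev_graph).length + 1)
      [(start_id, 0)] (PySem.Set.ofList [start_id]) PySem.Set.empty)
    (fun x => x) false

-- ===== PORT B =====
-- Python: `max_depth is None or rounds < max_depth`
def pvCondB (maxd : Option Int) (level : Int) : Bool :=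
  match maxd with | none => true | some m => decide (level < m)

-- `{p for node in reach for p in rev_graph.get(node, [])}`
def pvParC (rev : List (String × List String)) (reach : PySem.Set String) : PySem.Set String :=
  reach.foldl (fun acc n => PySem.Set.update acc (PySem.Dict.getD ⟨rev⟩ n [])) PySem.Set.empty

-- B's `while …` loop (fuel only guards totality; it never runs out, see pvLoopC_fuel)
def pvLoopC (rev : List (String × List String)) (maxd : Option Int) :
    Nat → PySem.Set String → Int → PySem.Set String
  | 0, reach, _ => reach
  | fuel + 1, reach, rounds =>
    if pvCondB maxd rounds then
      if (PySem.Set.diff (pvParC rev reach) reach).isEmpty then reach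
      else pvLoopC rev maxd fuel
        (PySem.Set.update reach (PySem.Set.diff (pvParC rev reach) reach)) (rounds + 1)
    else reach

def bfs_reverse_collect_py_alt (start_id : String) (rev_graph : List (String × List String))
    (max_depth : Option Int) : List String :=
  PySem.List.sorted
    (PySem.Set.diff
      (pvLoopC rev_graph max_depth ((pvUni rev_graph).length + 1)
        (PySem.Set.ofList [start_id]) 0)
      [start_id])
    (fun x => x) false

-- ===== PRECONDITION & SPEC =====
def Spec_bfs_reverse_collect_py (start_id : String) (rev_graph : List (String × List String)) (max_depth : Option Int) (out : List String) : Prop := out = bfs_reverse_collect_py_alt start_id rev_graph max_depth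
instance (start_id : String) (rev_graph : List (String × List String)) (max_depth : Option Int) (out : List String) : Decidable (Spec_bfs_reverse_collect_py start_id rev_graph max_depth out) := by unfold Spec_bfs_reverse_collect_py; infer_instance

-- ===== CLAIM (what is proved, stated in full; the proofs are below) =====
def Claim_equal_bfs_reverse_collect_py : Prop := ∀ (start_id : String) (rev_graph : List (String × List String)) (max_depth : Option Int), Dom_bfs_reverse_collect_py start_id rev_graph max_depth → Spec_bfs_reverse_collect_py start_id rev_graph max_depth (bfs_reverse_collect_py start_id rev_graph max_depth)

-- ===== LEMMAS AND PROOFS =====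

-- number of universe strings not yet visited: the decreasing part of the loop measures
def pvUnvis (uni vis : List String) : Nat := uni.countP (fun u => !(PySem.Set.contains vis u))

lemma pvNotMem (vis : List String) (p : String) (hc : PySem.Set.contains vis p = false) :
    p ∉ vis := by simpa [PySem.Set.contains] using hc

lemma pvMemOf (vis : List String) (p : String) (hc : PySem.Set.contains vis p = true) :
    p ∈ vis := by simpa [PySem.Set.contains] using hc

lemma pvContains_add (vis : List String) (x u : String)
    (hc : PySem.Set.contains vis x = false) :
    PySem.Set.contains (PySem.Set.add vis x) u
      = (PySem.Set.contains vis u || decide (u = x)) := by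
  have hm := pvNotMem vis x hc
  simp [PySem.Set.add, PySem.Set.contains, hm]

lemma pvCountP_mono (l : List String) (p q : String → Bool)
    (h : ∀ a ∈ l, p a = true → q a = true) : l.countP p ≤ l.countP q := by
  induction l with
  | nil => simp
  | cons a t ih =>
    rw [List.countP_cons, List.countP_cons]
    have ht := ih (fun b hb => h b (List.mem_cons_of_mem _ hb))
    by_cases hp : p a = true
    · rw [h a List.mem_cons_self hp]; simp [hp]; omega
    · simp [hp]; split <;> omega

lemma pvCountP_and_lt (l : List String) (p : String → Bool) (x : String)
    (hx : x ∈ l) (hpx : p x = true) :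
    l.countP (fun u => p u && !(decide (u = x))) < l.countP p := by
  induction l with
  | nil => simp at hx
  | cons a t ih =>
    rw [List.countP_cons, List.countP_cons]
    have hmono : t.countP (fun u => p u && !(decide (u = x))) ≤ t.countP p :=
      pvCountP_mono t _ _ (fun b _ hb => ((Bool.and_eq_true _ _).mp hb).1)
    rcases List.mem_cons.mp hx with rfl | hx'
    · rw [if_neg (by simp), if_pos hpx]
      omega
    · have hh : (if (p a && !(decide (a = x))) = true then (1 : Nat) else 0)
          ≤ (if p a = true then 1 else 0) := by
        by_cases hpa : (p a && !(decide (a = x))) = true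
        · rw [if_pos hpa, if_pos ((Bool.and_eq_true _ _).mp hpa).1]
        · rw [if_neg hpa]; split <;> omega
      have := ih hx'
      omega

lemma pvUnvis_add_lt (uni vis : List String) (x : String) (hx : x ∈ uni)
    (hc : PySem.Set.contains vis x = false) :
    pvUnvis uni (PySem.Set.add vis x) < pvUnvis uni vis := by
  unfold pvUnvis
  have heq : uni.countP (fun u => !(PySem.Set.contains (PySem.Set.add vis x) u))
      = uni.countP (fun u => (!(PySem.Set.contains vis u)) && !(decide (u = x))) := by
    apply List.countP_congr
    intro a _
    rw [pvContains_add vis x a hc]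
    simp
  rw [heq]
  exact pvCountP_and_lt uni _ x hx (by simp [pvNotMem vis x hc])

-- a strictly larger visited set shrinks the measure
lemma pvUnvis_lt (uni V V' : List String) (x : String) (h : ∀ u, u ∈ V → u ∈ V')
    (hx : x ∈ uni) (hx' : x ∈ V') (hnx : x ∉ V) :
    pvUnvis uni V' < pvUnvis uni V := by
  have h1 : pvUnvis uni V'
      ≤ uni.countP (fun u => (!(PySem.Set.contains V u)) && !(decide (u = x))) := by
    apply pvCountP_mono
    intro a _ ha
    simp only [Bool.not_eq_true'] at ha
    have haV' : a ∉ V' := pvNotMem _ _ ha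
    have haV : a ∉ V := fun hm => haV' (h a hm)
    have hax : a ≠ x := fun he => haV' (he ▸ hx')
    simp [PySem.Set.contains, haV, hax]
  have h2 : uni.countP (fun u => (!(PySem.Set.contains V u)) && !(decide (u = x)))
      < pvUnvis uni V := by
    apply pvCountP_and_lt uni _ x hx
    simp [PySem.Set.contains, hnx]
  omega

lemma pvGetD_subset (rev : List (String × List String)) (node : String) :
    ∀ p ∈ PySem.Dict.getD ⟨rev⟩ node [], p ∈ pvUni rev := by
  intro p hp
  unfold PySem.Dict.getD PySem.Dict.get? at hp
  cases hfind : List.find? (fun pr => pr.1 == node) rev with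
  | none => rw [show (PySem.Dict.mk rev).items = rev from rfl, hfind] at hp; simp at hp
  | some pr =>
    rw [show (PySem.Dict.mk rev).items = rev from rfl, hfind] at hp
    simp at hp
    exact List.mem_flatMap.mpr ⟨pr, List.mem_of_find?_eq_some hfind, hp⟩

lemma pvFoldA_bound (uni : List String) (depth : Int) :
    ∀ (parents : List String), (∀ p ∈ parents, p ∈ uni) →
    ∀ (st : List (String × Int) × PySem.Set String × PySem.Set String),
    2 * pvUnvis uni (parents.foldl (pvFA depth) st).2.1 + (parents.foldl (pvFA depth) st).1.length
      ≤ 2 * pvUnvis uni st.2.1 + st.1.length := by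
  intro parents
  induction parents with
  | nil => intro _ st; simp
  | cons p t ih =>
    intro hp st
    rw [List.foldl_cons]
    refine le_trans (ih (fun q hq => hp q (List.mem_cons_of_mem _ hq)) _) ?_
    cases hc : PySem.Set.contains st.2.1 p
    · have hm := pvNotMem _ p hc
      have hlt := pvUnvis_add_lt uni st.2.1 p (hp p List.mem_cons_self) hc
      simp [PySem.Set.add, hm] at hlt
      simp [pvFA, hm]
      omega
    · simp [pvFA, pvMemOf _ p hc]

lemma pvStepA_measure (rev : List (String × List String)) (depth : Int)
    (q : List (String × Int)) (vis res : PySem.Set String) (node : String) :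
    2 * pvUnvis (pvUni rev) (pvStepA rev depth (q, vis, res) node).2.1
      + (pvStepA rev depth (q, vis, res) node).1.length
      ≤ 2 * pvUnvis (pvUni rev) vis + q.length := by
  unfold pvStepA
  exact pvFoldA_bound (pvUni rev) depth _ (pvGetD_subset rev node) (q, vis, res)

-- ---- proof-side intermediate: a level-synchronous BFS between A and B ----
def pvFB (s : List String × PySem.Set String × PySem.Set String) (p : String) :
    List String × PySem.Set String × PySem.Set String :=
  if PySem.Set.contains s.2.1 p then s
  else (s.1 ++ [p], PySem.Set.add s.2.1 p, PySem.Set.add s.2.2 p)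

def pvExpandB (rev : List (String × List String))
    (st : List String × PySem.Set String × PySem.Set String) (node : String) :
    List String × PySem.Set String × PySem.Set String :=
  (PySem.Dict.getD ⟨rev⟩ node []).foldl pvFB st

lemma pvFoldB_bound (uni : List String) :
    ∀ (parents : List String), (∀ p ∈ parents, p ∈ uni) →
    ∀ (st : List String × PySem.Set String × PySem.Set String),
    pvUnvis uni (parents.foldl pvFB st).2.1 + (parents.foldl pvFB st).1.length
      ≤ pvUnvis uni st.2.1 + st.1.length := by
  intro parents
  induction parents with
  | nil => intro _ st; simp
  | cons p t ih =>
    intro hp st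
    rw [List.foldl_cons]
    refine le_trans (ih (fun q hq => hp q (List.mem_cons_of_mem _ hq)) _) ?_
    cases hc : PySem.Set.contains st.2.1 p
    · have hm := pvNotMem _ p hc
      have hlt := pvUnvis_add_lt uni st.2.1 p (hp p List.mem_cons_self) hc
      simp [PySem.Set.add, hm] at hlt
      simp [pvFB, hm]
      omega
    · simp [pvFB, pvMemOf _ p hc]

lemma pvExpandB_bound (rev : List (String × List String))
    (st : List String × PySem.Set String × PySem.Set String) (node : String) :
    pvUnvis (pvUni rev) (pvExpandB rev st node).2.1 + (pvExpandB rev st node).1.length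
      ≤ pvUnvis (pvUni rev) st.2.1 + st.1.length := by
  unfold pvExpandB
  exact pvFoldB_bound (pvUni rev) _ (pvGetD_subset rev node) st

lemma pvFrontier_bound (rev : List (String × List String)) :
    ∀ (frontier : List String) (st : List String × PySem.Set String × PySem.Set String),
    pvUnvis (pvUni rev) (frontier.foldl (pvExpandB rev) st).2.1
      + (frontier.foldl (pvExpandB rev) st).1.length
      ≤ pvUnvis (pvUni rev) st.2.1 + st.1.length := by
  intro frontier
  induction frontier with
  | nil => intro st; simp
  | cons node rest ih =>
    intro st
    rw [List.foldl_cons]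
    refine le_trans (ih _) ?_
    exact pvExpandB_bound rev st node

lemma pvLoopB_measure (rev : List (String × List String))
    (frontier : List String) (vis res : PySem.Set String) :
    pvUnvis (pvUni rev) (frontier.foldl (pvExpandB rev) ([], vis, res)).2.1
      + (if (frontier.foldl (pvExpandB rev) ([], vis, res)).1.isEmpty then 0 else 1)
      < pvUnvis (pvUni rev) vis + 1 := by
  have h := pvFrontier_bound rev frontier ([], vis, res)
  simp only [List.length_nil] at h
  cases hst : (frontier.foldl (pvExpandB rev) ([], vis, res)).1 with
  | nil => rw [hst] at h; simp at h ⊢; omega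
  | cons a t => rw [hst] at h; simp at h ⊢; omega

-- Well-founded twins of the fueled loops (proof-side only).
def pvLoopAW (rev : List (String × List String)) (maxd : Option Int)
    (q : List (String × Int)) (vis res : PySem.Set String) : PySem.Set String :=
  match q with
  | [] => res
  | (node, depth) :: q' =>
    if pvCondA maxd depth then
      pvLoopAW rev maxd q' vis res
    else
      pvLoopAW rev maxd (pvStepA rev depth (q', vis, res) node).1
        (pvStepA rev depth (q', vis, res) node).2.1
        (pvStepA rev depth (q', vis, res) node).2.2
termination_by 2 * pvUnvis (pvUni rev) vis + q.length
decreasing_by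
  · simp only [List.length_cons]
    omega
  · have := pvStepA_measure rev depth q' vis res node
    simp only [List.length_cons]
    omega

def pvLoopBW (rev : List (String × List String)) (maxd : Option Int)
    (frontier : List String) (vis res : PySem.Set String) (level : Int) : PySem.Set String :=
  if h : (!frontier.isEmpty && pvCondB maxd level) = true then
    pvLoopBW rev maxd (frontier.foldl (pvExpandB rev) ([], vis, res)).1
      (frontier.foldl (pvExpandB rev) ([], vis, res)).2.1
      (frontier.foldl (pvExpandB rev) ([], vis, res)).2.2 (level + 1)
  else res
termination_by pvUnvis (pvUni rev) vis + (if frontier.isEmpty then 0 else 1)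
decreasing_by
  have hf : frontier.isEmpty = false := by
    rcases Bool.and_eq_true .. |>.mp h with ⟨h1, _⟩
    simpa using h1
  have hm2 := pvLoopB_measure rev frontier vis res
  simp only [List.foldl_attach, List.isEmpty_iff] at hm2 ⊢
  have hf' : frontier ≠ [] := by simpa [List.isEmpty_iff] using hf
  rw [if_neg hf']
  omega

-- With enough fuel the fueled loop A computes its well-founded twin.
lemma pvLoopA_fuel (rev : List (String × List String)) (maxd : Option Int) :
    ∀ (fuel : Nat) (q : List (String × Int)) (vis res : PySem.Set String),
    2 * pvUnvis (pvUni rev) vis + q.length ≤ fuel →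
    pvLoopA rev maxd fuel q vis res = pvLoopAW rev maxd q vis res := by
  intro fuel
  induction fuel with
  | zero =>
    intro q vis res hb
    cases q with
    | nil => simp [pvLoopA, pvLoopAW.eq_def]
    | cons hd q' => simp at hb
  | succ fuel ih =>
    intro q vis res hb
    cases q with
    | nil => simp [pvLoopA, pvLoopAW.eq_def]
    | cons hd q' =>
      obtain ⟨node, depth⟩ := hd
      rw [pvLoopAW.eq_def]
      dsimp only
      simp only [pvLoopA]
      by_cases hc : pvCondA maxd depth = true
      · rw [if_pos hc, if_pos hc]
        apply ih
        simp only [List.length_cons] at hb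
        omega
      · rw [if_neg hc, if_neg hc]
        apply ih
        have := pvStepA_measure rev depth q' vis res node
        simp only [List.length_cons] at hb
        omega

-- One step of A's inner loop on a queue of shape q ++ (next at depth+1) is one step of
-- the level BFS's inner loop on next, with the new discoveries appended at depth+1.
lemma pvFold_rel (depth : Int) :
    ∀ (parents : List String) (q : List (String × Int)) (next : List String)
      (vis res : PySem.Set String),
    parents.foldl (pvFA depth) (q ++ next.map (fun n => (n, depth + 1)), vis, res)
      = (q ++ ((parents.foldl pvFB (next, vis, res)).1).map (fun n => (n, depth + 1)),
         (parents.foldl pvFB (next, vis, res)).2.1,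
         (parents.foldl pvFB (next, vis, res)).2.2) := by
  intro parents
  induction parents with
  | nil => intro q next vis res; simp
  | cons p t ih =>
    intro q next vis res
    rw [List.foldl_cons, List.foldl_cons]
    cases hc : PySem.Set.contains vis p
    · have hm := pvNotMem vis p hc
      have hA : pvFA depth (q ++ next.map (fun n => (n, depth + 1)), vis, res) p
          = (q ++ (next ++ [p]).map (fun n => (n, depth + 1)), PySem.Set.add vis p,
             PySem.Set.add res p) := by
        simp [pvFA, hm, List.append_assoc]
      have hB : pvFB (next, vis, res) p
          = (next ++ [p], PySem.Set.add vis p, PySem.Set.add res p) := by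
        simp [pvFB, hm]
      rw [hA, hB]
      exact ih q (next ++ [p]) (PySem.Set.add vis p) (PySem.Set.add res p)
    · have hm := pvMemOf vis p hc
      have hA : pvFA depth (q ++ next.map (fun n => (n, depth + 1)), vis, res) p
          = (q ++ next.map (fun n => (n, depth + 1)), vis, res) := by simp [pvFA, hm]
      have hB : pvFB (next, vis, res) p = (next, vis, res) := by simp [pvFB, hm]
      rw [hA, hB]
      exact ih q next vis res

lemma pvStep_rel (rev : List (String × List String)) (depth : Int) (node : String)
    (q : List (String × Int)) (next : List String) (vis res : PySem.Set String) :
    pvStepA rev depth (q ++ next.map (fun n => (n, depth + 1)), vis, res) node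
      = (q ++ ((pvExpandB rev (next, vis, res) node).1).map (fun n => (n, depth + 1)),
         (pvExpandB rev (next, vis, res) node).2.1,
         (pvExpandB rev (next, vis, res) node).2.2) := by
  unfold pvStepA pvExpandB
  exact pvFold_rel depth _ q next vis res

-- When every queued depth has reached max_depth, A only drains the queue.
lemma pvDrain (rev : List (String × List String)) (m : Int) :
    ∀ (q : List (String × Int)) (vis res : PySem.Set String),
    (∀ x ∈ q, m ≤ x.2) → pvLoopAW rev (some m) q vis res = res := by
  intro q
  induction q with
  | nil => intro vis res _; simp [pvLoopAW.eq_def]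
  | cons hd t ih =>
    intro vis res h
    obtain ⟨node, depth⟩ := hd
    rw [pvLoopAW.eq_def]
    have hm : m ≤ depth := h (node, depth) List.mem_cons_self
    have hd' : pvCondA (some m) depth = true := by simp [pvCondA]; omega
    simp only [hd', if_true]
    exact ih vis res (fun x hx => h x (List.mem_cons_of_mem _ hx))

-- Mid-level bridge: A's queue of shape (frontier at level) ++ (next at level+1) behaves
-- like the level BFS finishing the current level from partial state (next, vis, res).
lemma pvMid (rev : List (String × List String)) (maxd : Option Int) (N : Nat)
    (IH : ∀ (f : List String) (vis res : PySem.Set String) (lv : Int),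
      pvUnvis (pvUni rev) vis + (if f.isEmpty then 0 else 1) ≤ N →
      pvLoopAW rev maxd (f.map (fun n => (n, lv))) vis res = pvLoopBW rev maxd f vis res lv)
    (level : Int)
    (hlv : ∀ m, maxd = some m → level < m) :
    ∀ (frontier next : List String) (vis res : PySem.Set String),
    pvUnvis (pvUni rev) vis + next.length ≤ N →
    pvLoopAW rev maxd (frontier.map (fun n => (n, level)) ++ next.map (fun n => (n, level + 1)))
        vis res
      = pvLoopBW rev maxd (frontier.foldl (pvExpandB rev) (next, vis, res)).1
          (frontier.foldl (pvExpandB rev) (next, vis, res)).2.1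
          (frontier.foldl (pvExpandB rev) (next, vis, res)).2.2 (level + 1) := by
  intro frontier
  induction frontier with
  | nil =>
    intro next vis res hb
    simp only [List.map_nil, List.nil_append, List.foldl_nil]
    apply IH
    cases next with
    | nil => simpa using hb
    | cons a t => simp at hb ⊢; omega
  | cons node rest ihf =>
    intro next vis res hb
    rw [List.map_cons, List.cons_append, pvLoopAW.eq_def]
    dsimp only
    have hskip : ¬ (pvCondA maxd level = true) := by
      intro hcontra
      cases maxd with
      | none => simp [pvCondA] at hcontra
      | some m =>
        simp [pvCondA] at hcontra
        exact absurd (hlv m rfl) (by omega)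
    rw [if_neg hskip]
    rw [pvStep_rel rev level node (rest.map (fun n => (n, level))) next vis res]
    have := ihf (pvExpandB rev (next, vis, res) node).1
      (pvExpandB rev (next, vis, res) node).2.1
      (pvExpandB rev (next, vis, res) node).2.2
      (by have h2 := pvExpandB_bound rev (next, vis, res) node; simp at h2; omega)
    rw [List.foldl_cons]
    simpa using this

-- Full bridge: A on a single-level queue equals the level BFS, by induction on the bound.
lemma pvOuter (rev : List (String × List String)) (maxd : Option Int) :
    ∀ (N : Nat) (frontier : List String) (vis res : PySem.Set String) (level : Int),
    pvUnvis (pvUni rev) vis + (if frontier.isEmpty then 0 else 1) ≤ N →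
    pvLoopAW rev maxd (frontier.map (fun n => (n, level))) vis res
      = pvLoopBW rev maxd frontier vis res level := by
  intro N
  induction N with
  | zero =>
    intro frontier vis res level hb
    cases frontier with
    | nil =>
      rw [pvLoopBW.eq_def, dif_neg (by simp)]
      simp [pvLoopAW.eq_def]
    | cons a t => simp at hb
  | succ N ihN =>
    intro frontier vis res level hb
    by_cases hcond : (!frontier.isEmpty && pvCondB maxd level) = true
    · rcases Bool.and_eq_true .. |>.mp hcond with ⟨h1, hlv⟩
      have hf : frontier.isEmpty = false := by simpa using h1
      have hlv' : ∀ m, maxd = some m → level < m := by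
        intro m hm; subst hm; simpa [pvCondB] using hlv
      rw [pvLoopBW.eq_def, dif_pos hcond]
      have hmid := pvMid rev maxd N ihN level hlv' frontier [] vis res
        (by rw [hf] at hb; simpa using Nat.le_of_succ_le_succ hb)
      simpa using hmid
    · rw [pvLoopBW.eq_def, dif_neg hcond]
      cases frontier with
      | nil => simp [pvLoopAW.eq_def]
      | cons a t =>
        have hm : ∃ m, maxd = some m ∧ m ≤ level := by
          cases maxd with
          | none => simp [pvCondB] at hcond
          | some m =>
            refine ⟨m, rfl, ?_⟩
            simp [pvCondB] at hcond
            omega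
        obtain ⟨m, rfl, hm⟩ := hm
        apply pvDrain
        intro x hx
        obtain ⟨n, _, rfl⟩ := List.mem_map.mp hx
        exact hm

-- ---- saturation side: membership facts and the well-founded twin of pvLoopC ----
lemma pvFoldUpd_mem (rev : List (String × List String)) :
    ∀ (L : List String) (acc : PySem.Set String) (x : String),
    x ∈ L.foldl (fun acc n => PySem.Set.update acc (PySem.Dict.getD ⟨rev⟩ n [])) acc
      ↔ x ∈ acc ∨ ∃ n ∈ L, x ∈ PySem.Dict.getD ⟨rev⟩ n [] := by
  intro L
  induction L with
  | nil => intro acc x; simp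
  | cons a t ih =>
    intro acc x
    rw [List.foldl_cons, ih, PySem.Set.mem_update]
    simp only [List.mem_cons]
    constructor
    · rintro ((h | h) | ⟨n, hn, hx⟩)
      · exact Or.inl h
      · exact Or.inr ⟨a, Or.inl rfl, h⟩
      · exact Or.inr ⟨n, Or.inr hn, hx⟩
    · rintro (h | ⟨n, (rfl | hn), hx⟩)
      · exact Or.inl (Or.inl h)
      · exact Or.inl (Or.inr hx)
      · exact Or.inr ⟨n, hn, hx⟩

lemma pvParC_mem (rev : List (String × List String)) (S : PySem.Set String) (x : String) :
    x ∈ pvParC rev S ↔ ∃ n ∈ S, x ∈ PySem.Dict.getD ⟨rev⟩ n [] := by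
  unfold pvParC
  rw [pvFoldUpd_mem]
  simp [PySem.Set.empty]

lemma pvParC_uni (rev : List (String × List String)) (S : PySem.Set String) (x : String)
    (h : x ∈ pvParC rev S) : x ∈ pvUni rev := by
  obtain ⟨n, _, hx⟩ := (pvParC_mem rev S x).mp h
  exact pvGetD_subset rev n x hx

lemma pvStepC_lt (rev : List (String × List String)) (S : PySem.Set String)
    (h : (PySem.Set.diff (pvParC rev S) S).isEmpty = false) :
    pvUnvis (pvUni rev) (PySem.Set.update S (PySem.Set.diff (pvParC rev S) S))
      < pvUnvis (pvUni rev) S := by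
  obtain ⟨x, hx⟩ := List.exists_mem_of_ne_nil _ (by simpa [List.isEmpty_iff] using h)
  have hd := (PySem.Set.mem_diff _ _ x).mp hx
  exact pvUnvis_lt (pvUni rev) S _ x
    (fun u hu => (PySem.Set.mem_update _ _ u).mpr (Or.inl hu))
    (pvParC_uni rev S x hd.1)
    ((PySem.Set.mem_update _ _ x).mpr (Or.inr hx)) hd.2

def pvLoopCW (rev : List (String × List String)) (maxd : Option Int)
    (S : PySem.Set String) (rounds : Int) : PySem.Set String :=
  if pvCondB maxd rounds then
    if h : (PySem.Set.diff (pvParC rev S) S).isEmpty then S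
    else pvLoopCW rev maxd
      (PySem.Set.update S (PySem.Set.diff (pvParC rev S) S)) (rounds + 1)
  else S
termination_by pvUnvis (pvUni rev) S
decreasing_by
  exact pvStepC_lt rev S (by simpa using h)

lemma pvLoopC_fuel (rev : List (String × List String)) (maxd : Option Int) :
    ∀ (fuel : Nat) (S : PySem.Set String) (rounds : Int),
    pvUnvis (pvUni rev) S < fuel →
    pvLoopC rev maxd fuel S rounds = pvLoopCW rev maxd S rounds := by
  intro fuel
  induction fuel with
  | zero => intro S rounds hb; omega
  | succ fuel ih =>
    intro S rounds hb
    rw [pvLoopCW.eq_def]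
    simp only [pvLoopC]
    by_cases hc : pvCondB maxd rounds = true
    · rw [if_pos hc, if_pos hc]
      by_cases he : (PySem.Set.diff (pvParC rev S) S).isEmpty = true
      · rw [if_pos he, dif_pos he]
      · rw [if_neg he, dif_neg he]
        apply ih
        have := pvStepC_lt rev S (by simpa using he)
        omega
    · rw [if_neg hc, if_neg hc]

-- predicate: x is a parent of some node of L
def pvPF (rev : List (String × List String)) (L : List String) (x : String) : Prop :=
  ∃ n ∈ L, x ∈ PySem.Dict.getD ⟨rev⟩ n []

-- membership characterization of the level BFS's inner fold
lemma pvFoldFB_mem :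
    ∀ (L : List String) (st : List String × PySem.Set String × PySem.Set String) (x : String),
    (x ∈ (L.foldl pvFB st).2.1 ↔ x ∈ st.2.1 ∨ x ∈ L) ∧
    (x ∈ (L.foldl pvFB st).1 ↔ x ∈ st.1 ∨ (x ∈ L ∧ x ∉ st.2.1)) ∧
    (x ∈ (L.foldl pvFB st).2.2 ↔ x ∈ st.2.2 ∨ (x ∈ L ∧ x ∉ st.2.1)) := by
  intro L
  induction L with
  | nil => intro st x; simp
  | cons p t ih =>
    intro st x
    rw [List.foldl_cons]
    cases hc : PySem.Set.contains st.2.1 p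
    · have hm := pvNotMem _ p hc
      have hB : pvFB st p = (st.1 ++ [p], PySem.Set.add st.2.1 p, PySem.Set.add st.2.2 p) := by
        simp [pvFB, hm]
      rw [hB]
      obtain ⟨ih1, ih2, ih3⟩ := ih (st.1 ++ [p], PySem.Set.add st.2.1 p, PySem.Set.add st.2.2 p) x
      dsimp only at ih1 ih2 ih3
      refine ⟨?_, ?_, ?_⟩
      · rw [ih1, PySem.Set.mem_add, List.mem_cons]
        exact or_assoc
      · rw [ih2, List.mem_append, List.mem_singleton, PySem.Set.mem_add, List.mem_cons]
        constructor
        · rintro ((h | rfl) | ⟨ht, hnv⟩)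
          · exact Or.inl h
          · exact Or.inr ⟨Or.inl rfl, hm⟩
          · exact Or.inr ⟨Or.inr ht, fun hv => hnv (Or.inl hv)⟩
        · rintro (h | ⟨(rfl | ht), hnv⟩)
          · exact Or.inl (Or.inl h)
          · exact Or.inl (Or.inr rfl)
          · by_cases hxp : x = p
            · exact Or.inl (Or.inr hxp)
            · exact Or.inr ⟨ht, fun hv => hv.elim hnv hxp⟩
      · rw [ih3, PySem.Set.mem_add, PySem.Set.mem_add, List.mem_cons]
        constructor
        · rintro ((h | rfl) | ⟨ht, hnv⟩)
          · exact Or.inl h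
          · exact Or.inr ⟨Or.inl rfl, hm⟩
          · exact Or.inr ⟨Or.inr ht, fun hv => hnv (Or.inl hv)⟩
        · rintro (h | ⟨(rfl | ht), hnv⟩)
          · exact Or.inl (Or.inl h)
          · exact Or.inl (Or.inr rfl)
          · by_cases hxp : x = p
            · exact Or.inl (Or.inr hxp)
            · exact Or.inr ⟨ht, fun hv => hv.elim hnv hxp⟩
    · have hm := pvMemOf _ p hc
      have hB : pvFB st p = st := by simp [pvFB, hm]
      rw [hB]
      obtain ⟨ih1, ih2, ih3⟩ := ih st x
      refine ⟨?_, ?_, ?_⟩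
      · rw [ih1, List.mem_cons]
        constructor
        · rintro (h | h)
          · exact Or.inl h
          · exact Or.inr (Or.inr h)
        · rintro (h | (rfl | h))
          · exact Or.inl h
          · exact Or.inl hm
          · exact Or.inr h
      · rw [ih2, List.mem_cons]
        constructor
        · rintro (h | ⟨ht, hnv⟩)
          · exact Or.inl h
          · exact Or.inr ⟨Or.inr ht, hnv⟩
        · rintro (h | ⟨(rfl | ht), hnv⟩)
          · exact Or.inl h
          · exact absurd hm hnv
          · exact Or.inr ⟨ht, hnv⟩
      · rw [ih3, List.mem_cons]
        constructor
        · rintro (h | ⟨ht, hnv⟩)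
          · exact Or.inl h
          · exact Or.inr ⟨Or.inr ht, hnv⟩
        · rintro (h | ⟨(rfl | ht), hnv⟩)
          · exact Or.inl h
          · exact absurd hm hnv
          · exact Or.inr ⟨ht, hnv⟩

lemma pvFoldFB_nodup :
    ∀ (L : List String) (st : List String × PySem.Set String × PySem.Set String),
    st.2.2.Nodup → (L.foldl pvFB st).2.2.Nodup := by
  intro L
  induction L with
  | nil => intro st h; exact h
  | cons p t ih =>
    intro st h
    rw [List.foldl_cons]
    apply ih
    unfold pvFB
    split
    · exact h
    · exact PySem.Set.nodup_add _ _ h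

-- the frontier fold is the parent fold over the concatenated parent lists
lemma pvExpand_flat (rev : List (String × List String)) :
    ∀ (F : List String) (st : List String × PySem.Set String × PySem.Set String),
    F.foldl (pvExpandB rev) st
      = (F.flatMap (fun n => PySem.Dict.getD ⟨rev⟩ n [])).foldl pvFB st := by
  intro F
  induction F with
  | nil => intro st; rfl
  | cons n t ih =>
    intro st
    rw [List.foldl_cons, List.flatMap_cons, List.foldl_append]
    exact ih _

-- a fold over already-visited parents changes nothing
lemma pvFoldFB_id :
    ∀ (L : List String) (st : List String × PySem.Set String × PySem.Set String),
    (∀ p ∈ L, p ∈ st.2.1) → L.foldl pvFB st = st := by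
  intro L
  induction L with
  | nil => intro st _; rfl
  | cons p t ih =>
    intro st h
    rw [List.foldl_cons]
    have hm : p ∈ st.2.1 := h p List.mem_cons_self
    have hB : pvFB st p = st := by simp [pvFB, hm]
    rw [hB]
    exact ih st (fun q hq => h q (List.mem_cons_of_mem _ hq))

-- nodup of the level BFS result
lemma pvLoopBW_nodup (rev : List (String × List String)) (maxd : Option Int) :
    ∀ (N : Nat) (F : List String) (V R : PySem.Set String) (level : Int),
    pvUnvis (pvUni rev) V + (if F.isEmpty then 0 else 1) ≤ N →
    R.Nodup → (pvLoopBW rev maxd F V R level).Nodup := by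
  intro N
  induction N with
  | zero =>
    intro F V R level hb hR
    cases F with
    | nil => rw [pvLoopBW.eq_def, dif_neg (by simp)]; exact hR
    | cons a t => simp at hb
  | succ N ih =>
    intro F V R level hb hR
    rw [pvLoopBW.eq_def]
    by_cases hc : (!F.isEmpty && pvCondB maxd level) = true
    · rw [dif_pos hc]
      have hf : F.isEmpty = false := by
        rcases Bool.and_eq_true .. |>.mp hc with ⟨h1, _⟩
        simpa using h1
      apply ih
      · have := pvLoopB_measure rev F V R
        rw [hf] at hb
        simp at hb
        omega
      · rw [pvExpand_flat]
        exact pvFoldFB_nodup _ ([], V, R) hR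
    · rw [dif_neg hc]; exact hR

-- nodup of the saturation result
lemma pvLoopCW_nodup (rev : List (String × List String)) (maxd : Option Int) :
    ∀ (N : Nat) (S : PySem.Set String) (rounds : Int),
    pvUnvis (pvUni rev) S ≤ N → S.Nodup → (pvLoopCW rev maxd S rounds).Nodup := by
  intro N
  induction N with
  | zero =>
    intro S rounds hb hS
    rw [pvLoopCW.eq_def]
    split
    · split
      · exact hS
      · rename_i he
        have := pvStepC_lt rev S (by simpa using he)
        omega
    · exact hS
  | succ N ih =>
    intro S rounds hb hS
    rw [pvLoopCW.eq_def]
    split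
    · split
      · exact hS
      · rename_i he
        apply ih
        · have := pvStepC_lt rev S (by simpa using he)
          omega
        · exact PySem.Set.nodup_update _ _ hS
    · exact hS

-- when the whole parent set is already reached, the saturation loop is a fixpoint
lemma pvCW_fix (rev : List (String × List String)) (maxd : Option Int)
    (S : PySem.Set String) (rounds : Int)
    (h : ∀ p ∈ pvParC rev S, p ∈ S) : pvLoopCW rev maxd S rounds = S := by
  rw [pvLoopCW.eq_def]
  split
  · have hnil : PySem.Set.diff (pvParC rev S) S = [] := by
      apply List.eq_nil_iff_forall_not_mem.mpr
      intro x hx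
      have hd := (PySem.Set.mem_diff _ _ x).mp hx
      exact hd.2 (h x hd.1)
    rw [dif_pos (by simp [hnil])]
  · rfl

-- The simulation: the level BFS from (frontier F, visited V, results R) computes, up to
-- membership, the saturation loop from any S with the same members as V, minus start.
lemma pvSim (rev : List (String × List String)) (maxd : Option Int) (start : String) :
    ∀ (N : Nat) (F : List String) (V R S : PySem.Set String) (level : Int),
    (∀ x, x ∈ S ↔ x ∈ V) →
    (∀ x, x ∈ R ↔ x ∈ V ∧ x ≠ start) →
    start ∈ V →
    (∀ x ∈ F, x ∈ V) →
    (∀ x ∈ V, x ∉ F → ∀ p ∈ PySem.Dict.getD ⟨rev⟩ x [], p ∈ V) →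
    pvUnvis (pvUni rev) V + (if F.isEmpty then 0 else 1) ≤ N →
    ∀ x, x ∈ pvLoopBW rev maxd F V R level ↔ (x ∈ pvLoopCW rev maxd S level ∧ x ≠ start) := by
  intro N
  induction N with
  | zero =>
    intro F V R S level hS hR hst hFV hcl hb x
    cases F with
    | nil =>
      rw [pvLoopBW.eq_def, dif_neg (by simp)]
      rw [pvCW_fix rev maxd S level (by
        intro p hp
        obtain ⟨n, hn, hpn⟩ := (pvParC_mem rev S p).mp hp
        exact (hS p).mpr (hcl n ((hS n).mp hn) (by simp) p hpn))]
      rw [hR x, hS x]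
    | cons a t => simp at hb
  | succ N ih =>
    intro F V R S level hS hR hst hFV hcl hb x
    by_cases hc : pvCondB maxd level = true
    · cases hF : F with
      | nil =>
        rw [pvLoopBW.eq_def, dif_neg (by simp)]
        rw [pvCW_fix rev maxd S level (by
          intro p hp
          obtain ⟨n, hn, hpn⟩ := (pvParC_mem rev S p).mp hp
          exact (hS p).mpr (hcl n ((hS n).mp hn) (by simp [hF]) p hpn))]
        rw [hR x, hS x]
      | cons a t =>
        subst hF
        have hcond : (!(a :: t).isEmpty && pvCondB maxd level) = true := by simp [hc]
        rw [pvLoopBW.eq_def, dif_pos hcond]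
        rw [pvExpand_flat]
        set flat := (a :: t).flatMap (fun n => PySem.Dict.getD ⟨rev⟩ n []) with hflat
        by_cases hnew : ∀ p ∈ flat, p ∈ V
        · -- nothing new: the BFS step is the identity and next round stops; C is a fixpoint
          rw [pvFoldFB_id flat ([], V, R) (by intro p hp; exact hnew p hp)]
          rw [pvLoopBW.eq_def, dif_neg (by simp)]
          rw [pvCW_fix rev maxd S level (by
            intro p hp
            obtain ⟨n, hn, hpn⟩ := (pvParC_mem rev S p).mp hp
            have hnV : n ∈ V := (hS n).mp hn
            by_cases hnF : n ∈ a :: t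
            · exact (hS p).mpr (hnew p (List.mem_flatMap.mpr ⟨n, hnF, hpn⟩))
            · exact (hS p).mpr (hcl n hnV hnF p hpn))]
          rw [hR x, hS x]
        · obtain ⟨p₀, hp₀f, hp₀v⟩ : ∃ p ∈ flat, p ∉ V := by
            by_contra hall
            exact hnew (fun p hp => by
              by_contra hpv
              exact hall ⟨p, hp, hpv⟩)
          -- characterize the fold result
          set W := flat.foldl pvFB ([], V, R) with hW
          have hmem := fun y => pvFoldFB_mem flat ([], V, R) y
          have memVis : ∀ y, y ∈ W.2.1 ↔ y ∈ V ∨ y ∈ flat := by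
            intro y; have := (hmem y).1; simpa using this
          have memF1 : ∀ y, y ∈ W.1 ↔ y ∈ flat ∧ y ∉ V := by
            intro y; have := (hmem y).2.1; simpa using this
          have memRes : ∀ y, y ∈ W.2.2 ↔ y ∈ R ∨ (y ∈ flat ∧ y ∉ V) := by
            intro y; have := (hmem y).2.2; simpa using this
          -- flat membership in terms of parents of S
          have hflatS : ∀ y, y ∈ flat → y ∈ pvParC rev S := by
            intro y hy
            obtain ⟨n, hn, hyn⟩ := List.mem_flatMap.mp hy
            exact (pvParC_mem rev S y).mpr ⟨n, (hS n).mpr (hFV n hn), hyn⟩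
          -- the saturation step fires
          have hp₀d : p₀ ∈ PySem.Set.diff (pvParC rev S) S :=
            (PySem.Set.mem_diff _ _ p₀).mpr ⟨hflatS p₀ hp₀f, fun hm => hp₀v ((hS p₀).mp hm)⟩
          have hne : (PySem.Set.diff (pvParC rev S) S).isEmpty = false := by
            cases hdl : PySem.Set.diff (pvParC rev S) S with
            | nil => rw [hdl] at hp₀d; cases hp₀d
            | cons b u => rfl
          rw [pvLoopCW.eq_def, if_pos hc, dif_neg (by simp [hne])]
          set S₁ := PySem.Set.update S (PySem.Set.diff (pvParC rev S) S) with hS₁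
          -- new invariants
          have memS₁ : ∀ y, y ∈ S₁ ↔ y ∈ V ∨ y ∈ flat := by
            intro y
            rw [hS₁, PySem.Set.mem_update, PySem.Set.mem_diff]
            constructor
            · rintro (h | ⟨hp, hns⟩)
              · exact Or.inl ((hS y).mp h)
              · obtain ⟨n, hn, hyn⟩ := (pvParC_mem rev S y).mp hp
                have hnV : n ∈ V := (hS n).mp hn
                by_cases hnF : n ∈ a :: t
                · exact Or.inr (List.mem_flatMap.mpr ⟨n, hnF, hyn⟩)
                · exact Or.inl (hcl n hnV hnF y hyn)
            · rintro (h | h)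
              · exact Or.inl ((hS y).mpr h)
              · by_cases hyS : y ∈ S
                · exact Or.inl hyS
                · exact Or.inr ⟨hflatS y h, hyS⟩
          have hSV₁ : ∀ y, y ∈ S₁ ↔ y ∈ W.2.1 := by
            intro y; rw [memS₁ y, memVis y]
          have hRV₁ : ∀ y, y ∈ W.2.2 ↔ y ∈ W.2.1 ∧ y ≠ start := by
            intro y
            rw [memRes y, memVis y, hR y]
            constructor
            · rintro (⟨hv, hns⟩ | ⟨hf, hnv⟩)
              · exact ⟨Or.inl hv, hns⟩
              · exact ⟨Or.inr hf, fun he => hnv (he ▸ hst)⟩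
            · rintro ⟨(hv | hf), hns⟩
              · exact Or.inl ⟨hv, hns⟩
              · by_cases hyv : y ∈ V
                · exact Or.inl ⟨hyv, hns⟩
                · exact Or.inr ⟨hf, hyv⟩
          have hst₁ : start ∈ W.2.1 := (memVis start).mpr (Or.inl hst)
          have hFV₁ : ∀ y ∈ W.1, y ∈ W.2.1 := by
            intro y hy
            exact (memVis y).mpr (Or.inr ((memF1 y).mp hy).1)
          have hcl₁ : ∀ y ∈ W.2.1, y ∉ W.1 →
              ∀ p ∈ PySem.Dict.getD ⟨rev⟩ y [], p ∈ W.2.1 := by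
            intro y hy hyf p hp
            rcases (memVis y).mp hy with hyV | hyflat
            · by_cases hyF : y ∈ a :: t
              · exact (memVis p).mpr (Or.inr (List.mem_flatMap.mpr ⟨y, hyF, hp⟩))
              · exact (memVis p).mpr (Or.inl (hcl y hyV hyF p hp))
            · by_cases hyV : y ∈ V
              · by_cases hyF : y ∈ a :: t
                · exact (memVis p).mpr (Or.inr (List.mem_flatMap.mpr ⟨y, hyF, hp⟩))
                · exact (memVis p).mpr (Or.inl (hcl y hyV hyF p hp))
              · exact absurd ((memF1 y).mpr ⟨hyflat, hyV⟩) hyf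
          -- measure
          have hmono : ∀ u, u ∈ V → u ∈ W.2.1 := fun u hu => (memVis u).mpr (Or.inl hu)
          have hp₀uni : p₀ ∈ pvUni rev := by
            obtain ⟨n, _, hyn⟩ := List.mem_flatMap.mp hp₀f
            exact pvGetD_subset rev n p₀ hyn
          have hlt : pvUnvis (pvUni rev) W.2.1 < pvUnvis (pvUni rev) V :=
            pvUnvis_lt (pvUni rev) V W.2.1 p₀ hmono hp₀uni
              ((memVis p₀).mpr (Or.inr hp₀f)) hp₀v
          have hb₁ : pvUnvis (pvUni rev) W.2.1 + (if W.1.isEmpty then 0 else 1) ≤ N := by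
            have : pvUnvis (pvUni rev) V + 1 ≤ N + 1 := by simpa using hb
            split <;> omega
          exact ih W.1 W.2.1 W.2.2 S₁ (level + 1) hSV₁ hRV₁ hst₁ hFV₁ hcl₁ hb₁ x
    · rw [pvLoopBW.eq_def, dif_neg (by simp [hc])]
      rw [pvLoopCW.eq_def, if_neg hc]
      rw [hR x, hS x]

-- ===== VERDICT (by name: the statement is the Claim_ definition above) =====
theorem bfs_reverse_collect_py_spec : Claim_equal_bfs_reverse_collect_py := by
  intro s rev maxd _
  unfold Spec_bfs_reverse_collect_py bfs_reverse_collect_py bfs_reverse_collect_py_alt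
  have hV0 : PySem.Set.ofList [s] = [s] := rfl
  have hcnt : pvUnvis (pvUni rev) [s] ≤ (pvUni rev).length := List.countP_le_length
  have hA := pvLoopA_fuel rev maxd (2 * (pvUni rev).length + 1)
    [(s, 0)] (PySem.Set.ofList [s]) PySem.Set.empty (by rw [hV0]; simp; omega)
  have hC := pvLoopC_fuel rev maxd ((pvUni rev).length + 1)
    (PySem.Set.ofList [s]) 0 (by rw [hV0]; omega)
  have hAB := pvOuter rev maxd (pvUnvis (pvUni rev) [s] + 1)
    [s] [s] PySem.Set.empty 0 (by simp)
  simp only [List.map_cons, List.map_nil] at hAB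
  rw [hA, hC, hV0]
  rw [show ([(s, (0 : Int))] : List (String × Int)) = [(s, 0)] from rfl] at hAB ⊢
  rw [hAB]
  -- the two results have the same members (up to removing s) and no duplicates
  have hmem := pvSim rev maxd s (pvUnvis (pvUni rev) [s] + 1)
    [s] [s] PySem.Set.empty [s] 0
    (fun x => Iff.rfl)
    (by intro x; simp [PySem.Set.empty])
    (by simp)
    (by intro x hx; exact hx)
    (by intro x hx hnx; exact absurd hx hnx)
    (by simp)
  have hBnodup : (pvLoopBW rev maxd [s] [s] PySem.Set.empty 0).Nodup :=
    pvLoopBW_nodup rev maxd (pvUnvis (pvUni rev) [s] + 1) [s] [s] PySem.Set.empty 0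
      (by simp) (by simp [PySem.Set.empty])
  have hCnodup : (pvLoopCW rev maxd [s] 0).Nodup :=
    pvLoopCW_nodup rev maxd (pvUnvis (pvUni rev) [s]) [s] 0 le_rfl (by simp)
  have hdiffmem : ∀ x, x ∈ PySem.Set.diff (pvLoopCW rev maxd [s] 0) [s]
      ↔ x ∈ pvLoopCW rev maxd [s] 0 ∧ x ≠ s := by
    intro x
    rw [PySem.Set.mem_diff]
    simp
  have hperm : (pvLoopBW rev maxd [s] [s] PySem.Set.empty 0).Perm
      (PySem.Set.diff (pvLoopCW rev maxd [s] 0) [s]) := by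
    rw [List.perm_ext_iff_of_nodup hBnodup (PySem.Set.nodup_diff _ _ hCnodup)]
    intro x
    rw [hmem x, hdiffmem x]
  exact PySem.List.sorted_eq_sorted_of_perm _ _ _ (fun a b h => h) hperm
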